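-- pv_equiv track=rewrite | github.com/ana-dav09/cryptop | integracion/present_linear_attack.py | generate_partial_key_candidates
-- ===== SOURCE A (Python) =====
-- from itertools import product
--
-- def generate_partial_key_candidates(active_sboxes):
--     """Genera candidatos de clave parcial para las S-boxes activas."""
--     num_active = len(active_sboxes)
--     candidates = []
--
--     for values in product(range(16), repeat=num_active):
--         key_nibbles = [0] * 16
--         for idx, sbox_idx in enumerate(active_sboxes):
--             key_nibbles[sbox_idx] = values[idx]
--         candidates.append(key_nibbles)
--
--     return candidates
-- ===== SOURCE B (Python) =====
-- def generate_partial_key_candidates(active_sboxes):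
--     """Genera candidatos de clave parcial para las S-boxes activas."""
--     candidates = [[0] * 16]
--     for sbox_idx in active_sboxes:
--         expanded = []
--         for c in candidates:
--             for v in range(16):
--                 nc = c.copy()
--                 nc[sbox_idx] = v
--                 expanded.append(nc)
--         candidates = expanded
--     return candidates
-- ===== Notes on version B (the rewrite author's own statement) =====
-- stated objective: simpler
-- what changed: Replaces itertools.product plus per-tuple enumerate/index assignment by incremental expansion: start from one all-zero key and, for each active S-box in turn, expand every partial candidate with the 16 possible nibble values.
import Mathlib
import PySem

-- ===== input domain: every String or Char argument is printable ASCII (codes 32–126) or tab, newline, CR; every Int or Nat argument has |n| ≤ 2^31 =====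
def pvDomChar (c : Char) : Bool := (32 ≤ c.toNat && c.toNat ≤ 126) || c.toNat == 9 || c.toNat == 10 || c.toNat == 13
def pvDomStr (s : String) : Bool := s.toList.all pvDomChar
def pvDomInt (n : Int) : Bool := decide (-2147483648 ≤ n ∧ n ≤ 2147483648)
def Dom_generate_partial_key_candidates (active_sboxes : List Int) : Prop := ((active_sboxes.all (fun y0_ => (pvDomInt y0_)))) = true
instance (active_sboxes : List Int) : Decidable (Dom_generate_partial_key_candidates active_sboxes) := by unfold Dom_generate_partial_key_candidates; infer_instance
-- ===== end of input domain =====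

-- B replaces itertools.product + per-tuple index assignment by incremental expansion of
-- partial candidates over the active S-boxes (simpler decomposition, same output order).


-- ===== PORT A =====
-- itertools.product(range(16), repeat=n): tuples in lexicographic order, first coord slowest
def prodRep16 (n : Nat) : List (List Int) :=
  match n with
  | 0 => [[]]
  | Nat.succ m => (PySem.List.pyRange 0 16 1).flatMap (fun x => (prodRep16 m).map (fun vs => x :: vs))

-- Python lists grown with .append are ported as Array with push (O(1), as in Python)
def generate_partial_key_candidates (active_sboxes : List Int) : List (List Int) :=
  let num_active := active_sboxes.length
  ((prodRep16 num_active).foldl (fun (candidates : Array (List Int)) values =>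
    let key_nibbles : List Int := List.replicate 16 0
    let key_nibbles := (PySem.List.enumerate active_sboxes 0).foldl
      (fun key p => PySem.List.pySetD key p.2 (PySem.List.pyGetD values p.1 0)) key_nibbles
    candidates.push key_nibbles) #[]).toList

-- ===== PORT B =====
-- nc = c.copy(); nc[sbox_idx] = v  is  PySem.List.pySetD c sbox_idx v (copy is implicit)
def generate_partial_key_candidates_alt (active_sboxes : List Int) : List (List Int) :=
  (active_sboxes.foldl (fun (candidates : Array (List Int)) sbox_idx =>
    candidates.foldl (fun expanded c =>
      (PySem.List.pyRange 0 16 1).foldl (fun expanded v =>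
        expanded.push (PySem.List.pySetD c sbox_idx v)) expanded) #[])
    #[List.replicate 16 (0 : Int)]).toList

-- ===== PRECONDITION & SPEC =====
-- Python A raises IndexError when some S-box index is outside [-16, 15] (the key has 16 nibbles).
def Pre_generate_partial_key_candidates (active_sboxes : List Int) : Prop :=
  ∀ i ∈ active_sboxes, -16 ≤ i ∧ i < 16
instance (active_sboxes : List Int) : Decidable (Pre_generate_partial_key_candidates active_sboxes) := by unfold Pre_generate_partial_key_candidates; infer_instance

def pvWitness_generate_partial_key_candidates : List Int := [3, -1]

def Spec_generate_partial_key_candidates (active_sboxes : List Int) (out : List (List Int)) : Prop := out = generate_partial_key_candidates_alt active_sboxes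
instance (active_sboxes : List Int) (out : List (List Int)) : Decidable (Spec_generate_partial_key_candidates active_sboxes out) := by unfold Spec_generate_partial_key_candidates; infer_instance

-- ===== CLAIM (what is proved, stated in full; the proofs are below) =====
def Claim_equal_generate_partial_key_candidates : Prop := ∀ (active_sboxes : List Int), Dom_generate_partial_key_candidates active_sboxes → Pre_generate_partial_key_candidates active_sboxes → Spec_generate_partial_key_candidates active_sboxes (generate_partial_key_candidates active_sboxes)

-- ===== LEMMAS AND PROOFS =====

-- canonical form: expand each index in turn
def canonPKC (base : List Int) (idxs : List Int) : List (List Int) :=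
  match idxs with
  | [] => [base]
  | i :: rest => (PySem.List.pyRange 0 16 1).flatMap
      (fun x => canonPKC (PySem.List.pySetD base i x) rest)

-- push-loop to list lemmas
lemma foldl_push_arr {α β : Type} (l : List β) (g : β → α) (arr : Array α) :
    l.foldl (fun a x => a.push (g x)) arr = arr ++ (l.map g).toArray := by
  induction l generalizing arr with
  | nil => simp
  | cons x xs ih => simp [ih]

lemma toList_foldl_push {α β : Type} (l : List β) (g : β → α) (arr : Array α) :
    (l.foldl (fun a x => a.push (g x)) arr).toList = arr.toList ++ l.map g := by
  rw [foldl_push_arr]; simp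

lemma toList_foldl_expand (L : List (List Int)) (i : Int) (arr : Array (List Int)) :
    (L.foldl (fun expanded c =>
        (PySem.List.pyRange 0 16 1).foldl (fun e v =>
          e.push (PySem.List.pySetD c i v)) expanded) arr).toList
    = arr.toList ++ L.flatMap (fun c => (PySem.List.pyRange 0 16 1).map
        (fun v => PySem.List.pySetD c i v)) := by
  induction L generalizing arr with
  | nil => simp
  | cons c cs ih =>
    rw [List.foldl_cons, foldl_push_arr, ih]
    simp

-- B equals the canonical form
lemma altPKC_step (cands : Array (List Int)) (i : Int) :
    (cands.foldl (fun expanded c =>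
      (PySem.List.pyRange 0 16 1).foldl (fun expanded v =>
        expanded.push (PySem.List.pySetD c i v)) expanded) #[]).toList
    = cands.toList.flatMap (fun c => (PySem.List.pyRange 0 16 1).map (fun v => PySem.List.pySetD c i v)) := by
  rw [← Array.foldl_toList, toList_foldl_expand]
  simp

lemma altPKC_eq_canon (idxs : List Int) (cands : Array (List Int)) :
    (idxs.foldl (fun candidates sbox_idx =>
      candidates.foldl (fun expanded c =>
        (PySem.List.pyRange 0 16 1).foldl (fun expanded v =>
          expanded.push (PySem.List.pySetD c sbox_idx v)) expanded) #[]) cands).toList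
    = cands.toList.flatMap (fun c => canonPKC c idxs) := by
  induction idxs generalizing cands with
  | nil => simp [canonPKC]
  | cons i rest ih =>
    rw [List.foldl_cons, ih, altPKC_step, List.flatMap_assoc]
    simp only [canonPKC, List.flatMap_map]

lemma pyGetD_cons_shift (x : Int) (vs : List Int) (s : Int) (hs : 0 ≤ s) :
    PySem.List.pyGetD (x :: vs) (s + 1) (0 : Int) = PySem.List.pyGetD vs s 0 := by
  obtain ⟨n, rfl⟩ := Int.eq_ofNat_of_zero_le hs
  simp [PySem.List.pyGetD, PySem.List.pyGet?_cons_succ]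

lemma assign_shift (rest : List Int) (x : Int) (vs : List Int) (s : Int) (hs : 0 ≤ s)
    (base : List Int) :
    (PySem.List.enumerate rest (s + 1)).foldl
      (fun key p => PySem.List.pySetD key p.2 (PySem.List.pyGetD (x :: vs) p.1 0)) base
    = (PySem.List.enumerate rest s).foldl
      (fun key p => PySem.List.pySetD key p.2 (PySem.List.pyGetD vs p.1 0)) base := by
  induction rest generalizing s base with
  | nil => simp [PySem.List.enumerate_nil]
  | cons j tail ih =>
    rw [PySem.List.enumerate_cons, PySem.List.enumerate_cons]
    simp only [List.foldl_cons]
    rw [pyGetD_cons_shift x vs s hs]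
    exact ih (s + 1) (by omega) _

lemma aPKC_eq_canon (idxs : List Int) (base : List Int) :
    (prodRep16 idxs.length).map (fun vs =>
      (PySem.List.enumerate idxs 0).foldl
        (fun key p => PySem.List.pySetD key p.2 (PySem.List.pyGetD vs p.1 0)) base)
    = canonPKC base idxs := by
  induction idxs generalizing base with
  | nil => simp [prodRep16, canonPKC, PySem.List.enumerate_nil]
  | cons i rest ih =>
    simp only [List.length_cons, prodRep16, canonPKC, List.map_flatMap, List.map_map]
    congr 1
    funext x
    have : ∀ vs : List Int,
        (PySem.List.enumerate (i :: rest) 0).foldl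
          (fun key p => PySem.List.pySetD key p.2 (PySem.List.pyGetD (x :: vs) p.1 0)) base
        = (PySem.List.enumerate rest 0).foldl
          (fun key p => PySem.List.pySetD key p.2 (PySem.List.pyGetD vs p.1 0))
          (PySem.List.pySetD base i x) := by
      intro vs
      rw [PySem.List.enumerate_cons]
      simp only [List.foldl_cons, PySem.List.pyGetD_zero_cons, zero_add]
      exact assign_shift rest x vs 0 le_rfl _
    simp only [Function.comp_def, this]
    exact ih (PySem.List.pySetD base i x)

-- ===== VERDICT (by name: the statement is the Claim_ definition above) =====
theorem generate_partial_key_candidates_spec : Claim_equal_generate_partial_key_candidates := by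
  intro active_sboxes _ _
  unfold Spec_generate_partial_key_candidates
  unfold generate_partial_key_candidates generate_partial_key_candidates_alt
  rw [altPKC_eq_canon]
  rw [show ((#[List.replicate 16 (0:Int)] : Array (List Int)).toList) = [List.replicate 16 0] from rfl]
  simp only [List.flatMap_cons, List.flatMap_nil, List.append_nil]
  rw [toList_foldl_push]
  simp only [List.nil_append]
  exact aPKC_eq_canon active_sboxes (List.replicate 16 0)
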